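-- pv_equiv track=rewrite | github.com/MMinasyan/hy-models | ortho_patterns.py | use_cases
-- ===== SOURCE A (Python) =====
-- def use_cases(input, output):
--     out_chars = []
--     upper_case = False
--     for i in range(len(output)):
--         if i < len(input):
--             upper_case = input[i].isupper()
--         next_char = output[i].upper() if upper_case else output[i]
--         out_chars.append(next_char)
--     return ''.join(out_chars)
-- ===== SOURCE B (Python) =====
-- def use_cases(input, output):
--     head = [o.upper() if i.isupper() else o for i, o in zip(input, output)]
--     tail = output[len(head):]
--     if input and input[-1].isupper():
--         tail = tail.upper()
--     return ''.join(head) + tail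
-- ===== Notes on version B (the rewrite author's own statement) =====
-- stated objective: faster
-- what changed: Replaces the flag-carrying index loop with a zip comprehension over the overlapping prefix plus one bulk str.upper() of the remaining tail driven by input[-1].
import Mathlib
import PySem

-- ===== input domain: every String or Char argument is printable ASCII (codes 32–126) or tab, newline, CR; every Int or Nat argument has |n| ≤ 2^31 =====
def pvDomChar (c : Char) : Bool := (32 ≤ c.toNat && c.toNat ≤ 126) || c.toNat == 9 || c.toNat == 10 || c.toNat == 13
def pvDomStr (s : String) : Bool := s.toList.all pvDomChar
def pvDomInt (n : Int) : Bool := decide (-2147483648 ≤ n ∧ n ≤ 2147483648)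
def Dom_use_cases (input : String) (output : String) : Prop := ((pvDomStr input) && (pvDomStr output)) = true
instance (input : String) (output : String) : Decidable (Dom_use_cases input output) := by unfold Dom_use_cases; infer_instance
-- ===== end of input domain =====

-- B replaces A's flag-carrying index loop with a zip over the overlapping prefix plus one
-- bulk uppercase of the tail (objective: idiomatic; return value only, no side effects).

-- ===== PORT A =====
def use_cases (input : String) (output : String) : String :=
  let inL := input.toList
  let outL := output.toList
  let res := (List.range outL.length).foldl
    (fun (st : List Char × Bool) i =>
      let uc := if i < inL.length then PySem.Chars.isupper (inL.getD i ' ') else st.2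
      let c := outL.getD i ' '
      let nc := if uc then PySem.Chars.upperChar c else c
      (st.1 ++ [nc], uc))
    ([], false)
  String.mk res.1

-- ===== PORT B =====
def use_cases_alt (input : String) (output : String) : String :=
  let inL := input.toList
  let outL := output.toList
  let head := (inL.zip outL).map
    (fun p => if PySem.Chars.isupper p.1 then PySem.Chars.upperChar p.2 else p.2)
  let tail := outL.drop head.length
  let tail :=
    match PySem.List.pyGet? inL (-1) with
    | some c => if PySem.Chars.isupper c then PySem.Chars.upper tail else tail
    | none => tail
  String.mk (head ++ tail)

-- ===== PRECONDITION & SPEC =====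
def Spec_use_cases (input : String) (output : String) (out : String) : Prop := out = use_cases_alt input output
instance (input : String) (output : String) (out : String) : Decidable (Spec_use_cases input output out) := by unfold Spec_use_cases; infer_instance

-- ===== CLAIM (what is proved, stated in full; the proofs are below) =====
def Claim_equal_use_cases : Prop := ∀ (input : String) (output : String), Dom_use_cases input output → Spec_use_cases input output (use_cases input output)

-- ===== LEMMAS AND PROOFS =====

/-- Common recursion both ports are reduced to. -/
def pvGo : List Char → List Char → Bool → List Char
  | _, [], _ => []
  | [], oc :: ot, b => (if b then PySem.Chars.upperChar oc else oc) :: pvGo [] ot b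
  | ic :: it, oc :: ot, _ =>
      (if PySem.Chars.isupper ic then PySem.Chars.upperChar oc else oc) ::
        pvGo it ot (PySem.Chars.isupper ic)

lemma pvGo_nil (outL : List Char) (b : Bool) :
    pvGo [] outL b = if b then outL.map PySem.Chars.upperChar else outL := by
  induction outL with
  | nil => cases b <;> simp [pvGo]
  | cons oc ot ih => cases b <;> simp [pvGo, ih]

lemma pvA_loop (n k : ℕ) (inL outL acc : List Char) (b : Bool)
    (h : k + n = outL.length) :
    ((List.range' k n).foldl
      (fun (st : List Char × Bool) i =>
        let uc := if i < inL.length then PySem.Chars.isupper (inL.getD i ' ') else st.2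
        let c := outL.getD i ' '
        let nc := if uc then PySem.Chars.upperChar c else c
        (st.1 ++ [nc], uc))
      (acc, b)).1 = acc ++ pvGo (inL.drop k) (outL.drop k) b := by
  induction n generalizing k acc b with
  | zero =>
      have : outL.drop k = [] := List.drop_of_length_le (by omega)
      simp [this, pvGo]
  | succ n ih =>
      have hk : k < outL.length := by omega
      rw [List.range'_succ, List.foldl_cons]
      have hout : outL.drop k = outL[k] :: outL.drop (k + 1) :=
        (List.getElem_cons_drop hk).symm
      by_cases hi : k < inL.length
      · have hin : inL.drop k = inL[k] :: inL.drop (k + 1) :=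
          (List.getElem_cons_drop hi).symm
        simp only [hi, if_true]
        rw [ih (k + 1) _ _ (by omega)]
        rw [hout, hin]
        simp [pvGo, List.getD, List.getElem?_eq_getElem hi, List.getElem?_eq_getElem hk]
      · have hin : inL.drop k = [] := List.drop_of_length_le (by omega)
        have hin' : inL.drop (k + 1) = [] := List.drop_of_length_le (by omega)
        simp only [hi, if_false]
        rw [ih (k + 1) _ _ (by omega)]
        rw [hout, hin, hin']
        simp [pvGo, List.getD, List.getElem?_eq_getElem hk]

lemma pvA_eq_go (input output : String) :
    use_cases input output = String.mk (pvGo input.toList output.toList false) := by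
  show String.mk ((List.range output.toList.length).foldl
    (fun (st : List Char × Bool) i =>
      let uc := if i < input.toList.length then PySem.Chars.isupper (input.toList.getD i ' ')
                else st.2
      let c := output.toList.getD i ' '
      let nc := if uc then PySem.Chars.upperChar c else c
      (st.1 ++ [nc], uc)) ([], false)).1 = _
  rw [List.range_eq_range',
    pvA_loop output.toList.length 0 input.toList output.toList [] false (by omega)]
  simp

lemma pvB_eq_go (inL outL : List Char) (b : Bool) :
    ((inL.zip outL).map
      (fun p => if PySem.Chars.isupper p.1 then PySem.Chars.upperChar p.2 else p.2)) ++
      (match inL.getLast? with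
       | some c =>
           if PySem.Chars.isupper c then
             (outL.drop ((inL.zip outL).map
               (fun p => if PySem.Chars.isupper p.1 then PySem.Chars.upperChar p.2 else p.2)).length).map PySem.Chars.upperChar
           else outL.drop ((inL.zip outL).map
               (fun p => if PySem.Chars.isupper p.1 then PySem.Chars.upperChar p.2 else p.2)).length
       | none =>
           if b then (outL.drop ((inL.zip outL).map
               (fun p => if PySem.Chars.isupper p.1 then PySem.Chars.upperChar p.2 else p.2)).length).map PySem.Chars.upperChar
           else outL.drop ((inL.zip outL).map
               (fun p => if PySem.Chars.isupper p.1 then PySem.Chars.upperChar p.2 else p.2)).length)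
      = pvGo inL outL b := by
  induction inL generalizing outL b with
  | nil => simp [pvGo_nil]
  | cons ic it ih =>
      cases outL with
      | nil => cases (ic :: it).getLast? <;> simp [pvGo]
      | cons oc ot =>
          simp only [List.zip_cons_cons, List.map_cons, List.length_cons, List.cons_append,
            List.drop_succ_cons, pvGo]
          cases it with
          | nil =>
              simp only [List.getLast?_singleton]
              simpa using ih ot (PySem.Chars.isupper ic)
          | cons d ds =>
              rw [List.getLast?_cons_cons]
              simpa using ih ot (PySem.Chars.isupper ic)

theorem use_cases_eq_alt (input output : String) :
    use_cases input output = use_cases_alt input output := by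
  rw [pvA_eq_go]
  show String.mk _ = String.mk
    ((input.toList.zip output.toList).map
      (fun p => if PySem.Chars.isupper p.1 then PySem.Chars.upperChar p.2 else p.2) ++
     match PySem.List.pyGet? input.toList (-1) with
     | some c => if PySem.Chars.isupper c then
          PySem.Chars.upper (output.toList.drop ((input.toList.zip output.toList).map
            (fun p => if PySem.Chars.isupper p.1 then PySem.Chars.upperChar p.2 else p.2)).length)
        else output.toList.drop ((input.toList.zip output.toList).map
            (fun p => if PySem.Chars.isupper p.1 then PySem.Chars.upperChar p.2 else p.2)).length
     | none => output.toList.drop ((input.toList.zip output.toList).map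
            (fun p => if PySem.Chars.isupper p.1 then PySem.Chars.upperChar p.2 else p.2)).length)
  rw [PySem.List.pyGet?_neg_one]
  congr 1
  rw [← pvB_eq_go input.toList output.toList false]
  cases hl : input.toList.getLast? with
  | none => simp
  | some c => by_cases h : PySem.Chars.isupper c <;> simp [h, PySem.Chars.upper]

-- ===== VERDICT (by name: the statement is the Claim_ definition above) =====
theorem use_cases_spec : Claim_equal_use_cases := by
  intro input output _
  exact use_cases_eq_alt input output
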